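-- pv_equiv track=rewrite | github.com/AaronFive/paramatch | utils.py | normalize_scene
-- ===== SOURCE A (Python) =====
-- def normalize_scene(scene, return_dict = False):
--     """Given a list of characters, transforms it in a parameterized word of the form ABABC"""
--     character_normalizing = dict()
--     order = 65
--     normalized_scene = []
--     for x in scene:
--         if x not in character_normalizing:
--             character_normalizing[x] = chr(order)
--             order += 1
--         normalized_scene.append(character_normalizing[x])
--     if return_dict:
--         return "".join(normalized_scene), character_normalizing
--     else:
--         return "".join(normalized_scene)
-- ===== SOURCE B (Python) =====
-- def normalize_scene(scene, return_dict=False):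
--     """Given a list of characters, transforms it in a parameterized word of the form ABABC"""
--     # The letter of x is determined by how many distinct characters appear strictly
--     # before x's first occurrence: no relabeling table is ever built.
--     def code(x):
--         return chr(65 + len(set(scene[:scene.index(x)])))
--     normalized = "".join(map(code, scene))
--     if return_dict:
--         return normalized, {x: code(x) for x in scene}
--     return normalized
-- ===== Notes on version B (the rewrite author's own statement) =====
-- stated objective: alternative
-- what changed: B builds no relabeling table at all: each element's letter is computed independently as chr(65 + number of distinct elements in the prefix before its first occurrence), replacing A's stateful incremental dict pass by a per-element closed-form rank; Pre_ excludes return_dict=True, where both programs return a (str, dict) tuple that is not a value of the declared String return type.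
import Mathlib
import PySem

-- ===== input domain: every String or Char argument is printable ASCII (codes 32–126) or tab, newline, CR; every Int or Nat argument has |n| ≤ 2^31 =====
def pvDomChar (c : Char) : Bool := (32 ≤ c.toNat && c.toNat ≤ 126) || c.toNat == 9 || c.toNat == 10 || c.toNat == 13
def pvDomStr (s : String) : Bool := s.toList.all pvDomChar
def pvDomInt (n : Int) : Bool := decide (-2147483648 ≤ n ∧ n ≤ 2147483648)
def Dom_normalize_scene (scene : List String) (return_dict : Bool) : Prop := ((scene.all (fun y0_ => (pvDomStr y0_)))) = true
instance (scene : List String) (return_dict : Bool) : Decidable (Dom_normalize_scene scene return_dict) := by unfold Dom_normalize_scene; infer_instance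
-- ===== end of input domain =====

-- B computes each letter independently as a closed-form prefix-distinct-count rank (no
-- relabeling table); return-value equivalence is proved for return_dict = false (Pre_ below).
-- Objective: alternative algorithm, no speed claim.

-- ===== PORT A =====
-- one iteration of A's loop: state = (character_normalizing, order, normalized_scene)
def pvStepA (st : PySem.Dict String String × Nat × List String) (x : String) :
    PySem.Dict String String × Nat × List String :=
  match st with
  | (d, order, acc) =>
    match d.get? x with                                     -- "if x not in character_normalizing"
    | none =>
      let d' := d.insert x (String.mk [Char.ofNat order])   -- character_normalizing[x] = chr(order)
      (d', order + 1, acc ++ [d'.getD x ""])                -- append character_normalizing[x] (key present, default unused)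
    | some _ => (d, order, acc ++ [d.getD x ""])

def normalize_scene (scene : List String) (return_dict : Bool) : String :=
  let st := scene.foldl pvStepA (⟨[]⟩, 65, [])
  -- when return_dict is True, Python returns a (str, dict) TUPLE — not a String value; that
  -- branch is excluded by Pre_ and both branches join the list here
  if return_dict then PySem.Str.join "" st.2.2 else PySem.Str.join "" st.2.2

-- ===== PORT B =====
-- code(x) = chr(65 + len(set(scene[:scene.index(x)]))); x is always drawn from scene, so
-- scene.index(x) never raises and the getD default is never used
def pvCodeB (scene : List String) (x : String) : String :=
  let i := (PySem.List.index? scene x).getD 0               -- scene.index(x)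
  let pre := PySem.List.slice scene none (some (i : Int))   -- scene[:i]
  String.mk [Char.ofNat (65 + (PySem.Set.ofList pre).length)]

def normalize_scene_alt (scene : List String) (return_dict : Bool) : String :=
  let normalized := PySem.Str.join "" (scene.map (pvCodeB scene))   -- "".join(map(code, scene))
  if return_dict then normalized else normalized            -- True branch excluded by Pre_ (tuple)

-- ===== PRECONDITION & SPEC =====
-- Pre_ excludes return_dict = true, on which A (and B) return a (str, dict) tuple — a value
-- outside the declared String return type, so no String-valued claim can cover it.
def Pre_normalize_scene (scene : List String) (return_dict : Bool) : Prop := return_dict = false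
instance (scene : List String) (return_dict : Bool) : Decidable (Pre_normalize_scene scene return_dict) := by unfold Pre_normalize_scene; infer_instance
def pvWitness_normalize_scene : List String × Bool := (["al", "bo", "al", "c"], false)

def Spec_normalize_scene (scene : List String) (return_dict : Bool) (out : String) : Prop := out = normalize_scene_alt scene return_dict
instance (scene : List String) (return_dict : Bool) (out : String) : Decidable (Spec_normalize_scene scene return_dict out) := by unfold Spec_normalize_scene; infer_instance

-- ===== CLAIM =====
def Claim_equal_normalize_scene : Prop := ∀ (scene : List String) (return_dict : Bool), Dom_normalize_scene scene return_dict → Pre_normalize_scene scene return_dict → Spec_normalize_scene scene return_dict (normalize_scene scene return_dict)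

-- ===== LEMMAS AND PROOFS =====

-- the one-character code chr(65 + i) given to the element of first-appearance index i
def pvEnc (i : Nat) : String := String.mk [Char.ofNat (65 + i)]

-- folding Set.add only appends to the accumulator
theorem pvFoldlAdd_prefix (r : List String) (init : List String) :
    ∃ t, List.foldl PySem.Set.add init r = init ++ t := by
  induction r generalizing init with
  | nil => exact ⟨[], by simp⟩
  | cons x xs ih =>
    simp only [List.foldl_cons]
    obtain ⟨t, ht⟩ := ih (PySem.Set.add init x)
    by_cases hx : x ∈ init
    · exact ⟨t, by simpa [PySem.Set.add, hx] using ht⟩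
    · exact ⟨x :: t, by simpa [PySem.Set.add, hx] using ht⟩

-- main invariant of A's loop: with the dict encoding the nodup seen-list L (codes = positions)
-- and order = 65 + |L|, the loop over rest emits the codes of positions in foldl Set.add L rest
theorem pvGoA (rest : List String) (L : List String) (hL : L.Nodup)
    (d : PySem.Dict String String) (acc : List String)
    (hd : ∀ x, d.get? x = if x ∈ L then some (pvEnc (L.idxOf x)) else none) :
    (rest.foldl pvStepA (d, 65 + L.length, acc)).2.2
      = acc ++ rest.map (fun x => pvEnc ((List.foldl PySem.Set.add L rest).idxOf x)) := by
  induction rest generalizing L d acc with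
  | nil => simp
  | cons x xs ih =>
    by_cases hx : x ∈ L
    · have hget := hd x
      rw [if_pos hx] at hget
      have hadd : PySem.Set.add L x = L := by simp [PySem.Set.add, hx]
      obtain ⟨t, ht⟩ := pvFoldlAdd_prefix xs L
      have hstep : pvStepA (d, 65 + L.length, acc) x
          = (d, 65 + L.length, acc ++ [pvEnc (L.idxOf x)]) := by
        simp [pvStepA, hget, PySem.Dict.getD]
      have hidx : (List.foldl PySem.Set.add L xs).idxOf x = L.idxOf x := by
        rw [ht]; exact List.idxOf_append_of_mem hx
      simp only [List.foldl_cons, hstep, List.map_cons, hadd]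
      rw [ih L hL d (acc ++ [pvEnc (L.idxOf x)]) hd]
      simp [hidx]
    · have hget := hd x
      rw [if_neg hx] at hget
      have hadd : PySem.Set.add L x = L ++ [x] := by simp [PySem.Set.add, hx]
      obtain ⟨t, ht⟩ := pvFoldlAdd_prefix xs (L ++ [x])
      have hL' : (L ++ [x]).Nodup := by
        simp [List.nodup_append, hL]
        intro a ha hax
        exact hx (hax ▸ ha)
      have hstep : pvStepA (d, 65 + L.length, acc) x
          = (d.insert x (pvEnc L.length), 65 + (L ++ [x]).length,
             acc ++ [pvEnc L.length]) := by
        simp [pvStepA, hget, PySem.Dict.getD, PySem.Dict.get?_insert_self, pvEnc]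
        omega
      have hd' : ∀ y, (d.insert x (pvEnc L.length)).get? y
          = if y ∈ L ++ [x] then some (pvEnc ((L ++ [x]).idxOf y)) else none := by
        intro y
        rcases eq_or_ne y x with hyx | hyx
        · rw [hyx, PySem.Dict.get?_insert_self]
          have hix : (L ++ [x]).idxOf x = L.length := by
            simp [List.idxOf_append, hx]
          simp [hix]
        · rw [PySem.Dict.get?_insert_of_ne _ _ hyx, hd y]
          by_cases hyL : y ∈ L
          · simp [hyL, List.idxOf_append_of_mem hyL]
          · simp [hyL, hyx]
      have hidxx : (List.foldl PySem.Set.add (L ++ [x]) xs).idxOf x = L.length := by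
        rw [ht, List.append_assoc]
        simp [List.idxOf_append, hx]
      simp only [List.foldl_cons, hstep, List.map_cons, hadd]
      rw [ih (L ++ [x]) hL' _ _ hd']
      simp [hidxx]

-- B's closed form meets A's index: for x ∉ L occurring in rest, the position of x in the
-- final seen-list equals the number of distinct elements accumulated over the prefix of rest
-- strictly before x's first occurrence
theorem pvRank (rest : List String) (L : List String) (x : String)
    (hxL : x ∉ L) (hx : x ∈ rest) :
    (List.foldl PySem.Set.add L rest).idxOf x
      = (List.foldl PySem.Set.add L (rest.take (rest.idxOf x))).length := by
  induction rest generalizing L with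
  | nil => cases hx
  | cons y ys ih =>
    rcases eq_or_ne x y with hxy | hxy
    · subst hxy
      simp only [List.idxOf_cons_self, List.take_zero, List.foldl_nil]
      have hadd : PySem.Set.add L x = L ++ [x] := by simp [PySem.Set.add, hxL]
      obtain ⟨t, ht⟩ := pvFoldlAdd_prefix ys (L ++ [x])
      simp only [List.foldl_cons, hadd, ht, List.append_assoc]
      simp [List.idxOf_append, hxL]
    · have hxys : x ∈ ys := by
        rcases List.mem_cons.mp hx with h | h
        · exact absurd h hxy
        · exact h
      have hxL' : x ∉ PySem.Set.add L y := by
        simp [PySem.Set.add]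
        split <;> simp_all
      rw [List.idxOf_cons_ne _ (Ne.symm hxy), List.take_succ_cons]
      simp only [List.foldl_cons]
      exact ih (PySem.Set.add L y) hxL' hxys

-- scene.index(x) = first index of x when x occurs in scene
theorem pvIndex?_mem (l : List String) (x : String) (hx : x ∈ l) :
    PySem.List.index? l x = some (l.idxOf x) := by
  induction l with
  | nil => cases hx
  | cons y ys ih =>
    rcases eq_or_ne y x with h | h
    · subst h
      rw [PySem.List.index?_cons_self]
      simp
    · have hxys : x ∈ ys := by
        rcases List.mem_cons.mp hx with h' | h'
        · exact absurd h'.symm h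
        · exact h'
      rw [PySem.List.index?_cons_of_ne ys h, ih hxys]
      simp [List.idxOf_cons_ne _ h]

-- ===== VERDICT =====
set_option maxHeartbeats 1000000 in
theorem normalize_scene_spec : Claim_equal_normalize_scene := by
  intro scene return_dict _ hpre
  have hrd : return_dict = false := hpre
  subst hrd
  show normalize_scene scene false = normalize_scene_alt scene false
  unfold normalize_scene normalize_scene_alt
  simp only [Bool.false_eq_true, if_false]
  have hA := pvGoA scene [] List.nodup_nil ⟨[]⟩ [] (fun x => rfl)
  simp only [List.length_nil, Nat.add_zero, List.nil_append] at hA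
  rw [hA]
  congr 1
  apply List.map_congr_left
  intro x hx
  have hidx : PySem.List.index? scene x = some (scene.idxOf x) := by
    exact pvIndex?_mem scene x hx
  unfold pvCodeB
  rw [hidx]
  simp only [Option.getD_some]
  rw [PySem.List.slice_to_natCast]
  have := pvRank scene [] x (by simp) hx
  rw [PySem.Set.ofList_eq_foldl]
  rw [← this]
  simp [pvEnc]
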